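-- pv_equiv track=rewrite | github.com/khalidelassaad/pythonlab | convexholes.py | give_n_points
-- ===== SOURCE A (Python) =====
-- def give_n_points(n):
--     returnlist = []
--     svalues = [290797]
--     nexts = lambda x : (x ** 2) % 50515093
--     coord = lambda x : (svalues[x] % 2000) - 1000
--     for i in range(0, n*4):
--         svalues.append(nexts(svalues[i-1]))
--     for x in range(1, n*2, 2):
--         returnlist.append((coord(2*x),coord(2*x+1)))
--     return returnlist
-- ===== SOURCE B (Python) =====
-- def give_n_points(n):
--     points = []
--     s = 290797
--     for _ in range(n):
--         s = (s * s) % 50515093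
--         x = s % 2000 - 1000
--         s = (s * s) % 50515093
--         y = s % 2000 - 1000
--         points.append((x, y))
--     return points
-- ===== Notes on version B (the rewrite author's own statement) =====
-- stated objective: simpler
-- what changed: B drops A's double-length svalues list (built via a negative-index self-reference) and its stride-2 index arithmetic, keeping only one running scalar of the squaring recurrence, advanced twice per emitted point.
import Mathlib
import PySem

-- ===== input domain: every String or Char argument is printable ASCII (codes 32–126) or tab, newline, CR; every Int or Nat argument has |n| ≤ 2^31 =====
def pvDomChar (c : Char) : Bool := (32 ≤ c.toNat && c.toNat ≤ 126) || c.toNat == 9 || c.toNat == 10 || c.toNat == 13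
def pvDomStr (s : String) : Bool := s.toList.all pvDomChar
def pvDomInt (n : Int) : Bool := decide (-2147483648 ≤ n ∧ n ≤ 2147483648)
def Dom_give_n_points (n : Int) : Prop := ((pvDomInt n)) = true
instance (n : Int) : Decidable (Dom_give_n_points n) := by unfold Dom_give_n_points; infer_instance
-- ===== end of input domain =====

-- B replaces A's double-length svalues list and stride-2 indexing by one running
-- scalar advanced twice per point (objective: simpler).

-- ===== PORT A =====
-- A's lambdas 'nexts' and 'coord' as helpers; Python's list indexing (which can be
-- negative, as in svalues[i-1] at i=0) is pyGetD — the index is always in range in A,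
-- so the default 0 is never returned and pyGetD is exact here.
def gnpNexts (x : Int) : Int := PySem.Int.mod (x ^ 2) 50515093
def gnpCoord (sv : List Int) (x : Int) : Int :=
  PySem.Int.mod (PySem.List.pyGetD sv x 0) 2000 - 1000

def give_n_points (n : Int) : List (Int × Int) :=
  let sv := (PySem.List.pyRange 0 (n*4) 1).foldl
      (fun sv i => sv ++ [gnpNexts (PySem.List.pyGetD sv (i-1) 0)]) [290797]
  (PySem.List.pyRange 1 (n*2) 2).foldl
      (fun rl x => rl ++ [(gnpCoord sv (2*x), gnpCoord sv (2*x+1))]) []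

-- ===== PORT B =====
-- one loop iteration of Source B: advance the scalar twice, append one point
def gnpAltStep (st : Int × List (Int × Int)) (_i : Int) : Int × List (Int × Int) :=
  let s1 := PySem.Int.mod (st.1 * st.1) 50515093
  let x := PySem.Int.mod s1 2000 - 1000
  let s2 := PySem.Int.mod (s1 * s1) 50515093
  let y := PySem.Int.mod s2 2000 - 1000
  (s2, st.2 ++ [(x, y)])

def give_n_points_alt (n : Int) : List (Int × Int) :=
  ((PySem.List.pyRange 0 n 1).foldl gnpAltStep (290797, [])).2

-- ===== PRECONDITION & SPEC =====
def Spec_give_n_points (n : Int) (out : List (Int × Int)) : Prop := out = give_n_points_alt n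
instance (n : Int) (out : List (Int × Int)) : Decidable (Spec_give_n_points n out) := by unfold Spec_give_n_points; infer_instance

-- ===== CLAIM (what is proved, stated in full; the proofs are below) =====
def Claim_equal_give_n_points : Prop := ∀ (n : Int), Dom_give_n_points n → Spec_give_n_points n (give_n_points n)

-- ===== LEMMAS AND PROOFS =====

-- the underlying squaring chain t_0 = 290797, t_{k+1} = t_k^2 mod 50515093
def gnpT : Nat → Int
  | 0 => 290797
  | k+1 => gnpNexts (gnpT k)

-- what A's first loop builds: svalues[j] = t_{⌈j/2⌉}
def gnpSv (m : Nat) : List Int := (List.range (m+1)).map (fun j => gnpT ((j+1)/2))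

-- the k-th emitted point, in terms of the chain
def gnpPair (k : Nat) : Int × Int :=
  (PySem.Int.mod (gnpT (2*k+1)) 2000 - 1000, PySem.Int.mod (gnpT (2*k+2)) 2000 - 1000)

theorem gnpSv_get (m j : Nat) (h : j ≤ m) :
    PySem.List.pyGetD (gnpSv m) (j : Int) 0 = gnpT ((j+1)/2) := by
  rw [PySem.List.pyGetD_of_nonneg _ _ (Int.natCast_nonneg j)]
  simp only [Int.toNat_natCast, gnpSv]
  exact PySem.List.getD_map_range _ _ _ _ (by omega)

theorem gnpSv_loop (m : Nat) :
    (PySem.List.pyRange 0 (m : Int) 1).foldl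
      (fun sv i => sv ++ [gnpNexts (PySem.List.pyGetD sv (i-1) 0)]) [290797] = gnpSv m := by
  induction m with
  | zero => simp [PySem.List.pyRange_one_eq_nil, gnpSv, gnpT]
  | succ m ih =>
    have : ((m+1 : Nat) : Int) = (m : Int) + 1 := by push_cast; ring
    rw [this, PySem.List.pyRange_one_succ_right (by positivity), List.foldl_append, ih]
    simp only [List.foldl_cons, List.foldl_nil]
    have hget : PySem.List.pyGetD (gnpSv m) ((m : Int) - 1) 0 = gnpT (m/2) := by
      cases m with
      | zero => decide
      | succ m' =>
        have : ((m'+1 : Nat) : Int) - 1 = (m' : Int) := by push_cast; ring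
        rw [this, gnpSv_get _ _ (by omega)]
    rw [hget]
    have : gnpNexts (gnpT (m/2)) = gnpT ((m+1+1)/2) := by
      have h2 : (m+1+1)/2 = m/2 + 1 := by omega
      rw [h2]; rfl
    rw [this]
    simp [gnpSv, List.range_succ]

theorem foldl_append_map {α β : Type} (g : α → β) (l : List α) (init : List β) :
    l.foldl (fun acc x => acc ++ [g x]) init = init ++ l.map g := by
  induction l generalizing init with
  | nil => simp
  | cons x l ih => simp [ih]

theorem gnpAlt_loop (l : List Int) (k : Nat) (acc : List (Int × Int)) :
    l.foldl gnpAltStep (gnpT (2*k), acc)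
      = (gnpT (2*k + 2*l.length), acc ++ (List.range l.length).map (fun j => gnpPair (k+j))) := by
  induction l generalizing k acc with
  | nil => simp
  | cons x l ih =>
    have h1 : PySem.Int.mod (gnpT (2*k) * gnpT (2*k)) 50515093 = gnpT (2*k+1) := by
      show _ = gnpNexts (gnpT (2*k)); rw [gnpNexts, pow_two]
    have h2 : PySem.Int.mod (gnpT (2*k+1) * gnpT (2*k+1)) 50515093 = gnpT (2*k+2) := by
      have h21 : 2*k+2 = (2*k+1)+1 := by omega
      rw [h21]; show _ = gnpNexts (gnpT (2*k+1)); rw [gnpNexts, pow_two]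
    have hstep : gnpAltStep (gnpT (2*k), acc) x = (gnpT (2*k+2), acc ++ [gnpPair k]) := by
      simp only [gnpAltStep, h1, h2, gnpPair]
    have hk2 : 2*k+2 = 2*(k+1) := by omega
    rw [List.foldl_cons, hstep, hk2, ih (k+1)]
    have hfun : ((fun j => gnpPair (k+j)) ∘ Nat.succ) = (fun j => gnpPair (k+1+j)) := by
      funext a
      simp only [Function.comp_apply, Nat.succ_eq_add_one]
      congr 1; omega
    have hmap : (List.range (l.length+1)).map (fun j => gnpPair (k+j))
        = gnpPair k :: (List.range l.length).map (fun j => gnpPair (k+1+j)) := by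
      rw [List.range_succ_eq_map, List.map_cons, List.map_map, Nat.add_zero, hfun]
    refine Prod.ext (by show gnpT _ = gnpT _; congr 1; simp only [List.length_cons]; omega) ?_
    show acc ++ [gnpPair k] ++ _ = acc ++ _
    rw [List.length_cons, hmap]
    simp

theorem give_n_points_eq (n : Int) (hn : 0 < n) :
    give_n_points n = (List.range n.toNat).map gnpPair := by
  unfold give_n_points
  have h4 : n*4 = ((4*n.toNat : Nat) : Int) := by
    push_cast [Int.toNat_of_nonneg hn.le]; ring
  rw [h4, gnpSv_loop (4*n.toNat)]
  rw [PySem.List.pyRange_of_pos 1 (n*2) (by norm_num)]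
  have hif : (if (1:Int) < n*2 then ((n*2 - 1 + 2 - 1)/2).toNat else 0) = n.toNat := by
    rw [if_pos (by omega)]
    have : n*2 - 1 + 2 - 1 = 2*n := by ring
    rw [this, Int.mul_ediv_cancel_left _ (by norm_num)]
  rw [hif, List.foldl_map, foldl_append_map]
  simp only [List.nil_append]
  apply List.map_congr_left
  intro k hk
  have hk' : k < n.toNat := List.mem_range.mp hk
  have e1 : 2*(1 + 2*(k:Int)) = ((4*k+2 : Nat) : Int) := by push_cast; ring
  have e2 : 2*(1 + 2*(k:Int)) + 1 = ((4*k+3 : Nat) : Int) := by push_cast; ring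
  unfold gnpCoord
  rw [e2, e1, gnpSv_get _ _ (by omega), gnpSv_get _ _ (by omega)]
  have f1 : (4*k+2+1)/2 = 2*k+1 := by omega
  have f2 : (4*k+3+1)/2 = 2*k+2 := by omega
  rw [f1, f2]; rfl

theorem give_n_points_alt_eq (n : Int) :
    give_n_points_alt n = (List.range n.toNat).map gnpPair := by
  unfold give_n_points_alt
  have h0 : gnpT (2*0) = 290797 := rfl
  have := gnpAlt_loop (PySem.List.pyRange 0 n 1) 0 []
  rw [h0] at this
  rw [this]
  simp [PySem.List.length_pyRange_one]

-- ===== VERDICT (by name: the statement is the Claim_ definition above) =====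
theorem give_n_points_spec : Claim_equal_give_n_points := by
  intro n _
  unfold Spec_give_n_points
  by_cases h : n ≤ 0
  · have hA : give_n_points n = [] := by
      unfold give_n_points
      rw [PySem.List.pyRange_of_pos 1 (n*2) (by norm_num), if_neg (by omega)]
      simp
    have hB : give_n_points_alt n = [] := by
      unfold give_n_points_alt
      rw [PySem.List.pyRange_one_eq_nil h]
      rfl
    rw [hA, hB]
  · rw [give_n_points_eq n (by omega), give_n_points_alt_eq]
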